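-- pv_equiv track=rewrite | github.com/roma-goodok/guca-evolution-lab | src/guca/ga/toolbox.py | _activity_scheme
-- ===== SOURCE A (Python) =====
-- from typing import Any, Dict, List, Optional, Tuple, Set, Sequence, Callable
--
-- def _activity_scheme(mask: Sequence[bool]) -> str:
--     """
--     Compact, legacy-like visualization:
--     - numbers for consecutive inactive runs
--     - 'x' for each active gene
--     Example: [F,F,T,T,F] -> '2xx1'
--     """
--     if not mask:
--         return ""
--     parts: List[str] = []
--     inactive_run = 0
--     for m in mask:
--         if m:
--             if inactive_run > 0:
--                 parts.append(str(inactive_run))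
--                 inactive_run = 0
--             parts.append("x")
--         else:
--             inactive_run += 1
--     if inactive_run > 0:
--         parts.append(str(inactive_run))
--     return "".join(parts)
-- ===== SOURCE B (Python) =====
-- def _activity_scheme(mask):
--     # Gap-arithmetic formulation: collect the indices of active genes, then
--     # derive each inactive-run length as the difference between consecutive
--     # active indices (and the tail gap), instead of scanning runs.
--     trues = [i for i, m in enumerate(mask) if m]
--     parts = []
--     prev = -1
--     for p in trues:
--         gap = p - prev - 1
--         if gap:
--             parts.append(str(gap))
--         parts.append("x")
--         prev = p
--     tail = len(mask) - prev - 1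
--     if tail:
--         parts.append(str(tail))
--     return "".join(parts)
-- ===== Notes on version B (the rewrite author's own statement) =====
-- stated objective: alternative
-- what changed: Instead of run-length scanning, B first collects the indices of active genes and then computes every inactive-run length arithmetically as the gap between consecutive active indices (plus the tail gap).
import Mathlib
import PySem

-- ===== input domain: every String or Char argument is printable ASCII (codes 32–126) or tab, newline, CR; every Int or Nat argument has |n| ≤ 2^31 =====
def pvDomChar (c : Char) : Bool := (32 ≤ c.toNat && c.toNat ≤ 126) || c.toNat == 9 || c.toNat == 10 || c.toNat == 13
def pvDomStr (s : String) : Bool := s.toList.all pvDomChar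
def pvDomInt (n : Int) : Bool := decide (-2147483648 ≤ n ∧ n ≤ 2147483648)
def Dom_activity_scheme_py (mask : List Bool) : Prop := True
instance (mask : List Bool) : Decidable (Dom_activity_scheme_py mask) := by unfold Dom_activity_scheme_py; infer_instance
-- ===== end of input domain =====

-- B replaces A's run-length scan by gap arithmetic over the list of active-gene
-- indices (alternative decomposition; same O(n) cost).

-- ===== PORT A =====
-- one loop iteration of A: state = (parts, inactive_run)
def aStep (s : List String × Int) (m : Bool) : List String × Int :=
  if m then
    (if s.2 > 0 then (s.1 ++ [PySem.Int.toStr s.2] ++ ["x"], 0) else (s.1 ++ ["x"], 0))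
  else (s.1, s.2 + 1)

def activity_scheme_py (mask : List Bool) : String :=
  if mask = [] then ""
  else
    let st := mask.foldl aStep ([], 0)
    let parts := if st.2 > 0 then st.1 ++ [PySem.Int.toStr st.2] else st.1
    PySem.Str.join "" parts

-- ===== PORT B =====
-- trues = [i for i, m in enumerate(mask) if m]
def bTrues (mask : List Bool) : List Int :=
  (PySem.List.enumerate mask).filterMap (fun p => if p.2 then some p.1 else none)

-- one loop iteration of B: state = (parts, prev); 'if gap:' is gap ≠ 0
def bStep (s : List String × Int) (p : Int) : List String × Int :=
  let gap := p - s.2 - 1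
  ((if gap ≠ 0 then s.1 ++ [PySem.Int.toStr gap] else s.1) ++ ["x"], p)

def activity_scheme_py_alt (mask : List Bool) : String :=
  let st := (bTrues mask).foldl bStep ([], -1)
  let tail := (mask.length : Int) - st.2 - 1
  let parts := if tail ≠ 0 then st.1 ++ [PySem.Int.toStr tail] else st.1
  PySem.Str.join "" parts

-- ===== PRECONDITION & SPEC =====
def Spec_activity_scheme_py (mask : List Bool) (out : String) : Prop := out = activity_scheme_py_alt mask
instance (mask : List Bool) (out : String) : Decidable (Spec_activity_scheme_py mask out) := by unfold Spec_activity_scheme_py; infer_instance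

-- ===== CLAIM (what is proved, stated in full; the proofs are below) =====
def Claim_equal_activity_scheme_py : Prop := ∀ (mask : List Bool), Dom_activity_scheme_py mask → Spec_activity_scheme_py mask (activity_scheme_py mask)

-- ===== LEMMAS AND PROOFS =====

-- canonical parts produced from a pending inactive run of length k
def aParts : Nat → List Bool → List String
  | k, [] => if k > 0 then [PySem.Int.toStr (k : Int)] else []
  | k, true :: t => (if k > 0 then [PySem.Int.toStr (k : Int)] else []) ++ ["x"] ++ aParts 0 t
  | k, false :: t => aParts (k + 1) t

def flushP (s : List String × Int) : List String :=
  if s.2 > 0 then s.1 ++ [PySem.Int.toStr s.2] else s.1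

theorem foldl_aStep_eq (mask : List Bool) :
    ∀ (parts : List String) (k : Nat),
      flushP (mask.foldl aStep (parts, (k : Int))) = parts ++ aParts k mask := by
  induction mask with
  | nil =>
    intro parts k
    by_cases h : 0 < k <;> simp [flushP, aParts, h]
  | cons m t ih =>
    intro parts k
    cases m with
    | true =>
      by_cases h : 0 < k
      · have : aStep (parts, (k : Int)) true = (parts ++ [PySem.Int.toStr (k : Int)] ++ ["x"], ((0 : Nat) : Int)) := by
          simp [aStep]; omega
        simp only [List.foldl_cons, this, ih]
        simp [aParts, h]
      · have : aStep (parts, (k : Int)) true = (parts ++ ["x"], ((0 : Nat) : Int)) := by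
          simp [aStep]; omega
        simp only [List.foldl_cons, this, ih]
        simp [aParts, h]
    | false =>
      have : aStep (parts, (k : Int)) false = (parts, ((k + 1 : Nat) : Int)) := by
        simp [aStep]
      simp only [List.foldl_cons, this, ih]
      simp [aParts]

-- B-side: the true indices of mask, each offset by a base b
def truesFrom (b : Int) : List Bool → List Int
  | [] => []
  | true :: t => b :: truesFrom (b + 1) t
  | false :: t => truesFrom (b + 1) t

theorem enumerate_trues (mask : List Bool) : ∀ (b : Int),
    (PySem.List.enumerate mask b).filterMap (fun p => if p.2 then some p.1 else none)
      = truesFrom b mask := by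
  induction mask with
  | nil => intro b; simp [truesFrom]
  | cons m t ih =>
    intro b
    cases m <;> simp [PySem.List.enumerate_cons, truesFrom, ih]

def finishB (endI : Int) (st : List String × Int) : List String :=
  if endI - st.2 - 1 ≠ 0 then st.1 ++ [PySem.Int.toStr (endI - st.2 - 1)] else st.1

theorem foldl_bStep_eq (mask : List Bool) :
    ∀ (b prev : Int) (k : Nat) (parts : List String), b - prev - 1 = (k : Int) →
      finishB (b + mask.length) ((truesFrom b mask).foldl bStep (parts, prev))
        = parts ++ aParts k mask := by
  induction mask with
  | nil =>
    intro b prev k parts hk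
    simp only [truesFrom, List.foldl_nil, List.length_nil, Nat.cast_zero, add_zero, finishB, hk]
    by_cases h : 0 < k
    · have h' : ¬ k = 0 := by omega
      simp [aParts, h, h']
    · have h0 : k = 0 := by omega
      subst h0
      simp [aParts]
  | cons m t ih =>
    intro b prev k parts hk
    cases m with
    | true =>
      have hstep : bStep (parts, prev) b
          = ((if k = 0 then parts else parts ++ [PySem.Int.toStr (k : Int)]) ++ ["x"], b) := by
        simp [bStep, hk]
      have hlen : b + ((true :: t).length : Int) = (b + 1) + (t.length : Int) := by
        push_cast [List.length_cons]; ring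
      rw [truesFrom, List.foldl_cons, hstep, hlen,
        ih (b + 1) b 0 _ (by push_cast; ring)]
      by_cases h : 0 < k
      · have h' : ¬ k = 0 := by omega
        simp [aParts, h, h']
      · have h0 : k = 0 := by omega
        simp [aParts, h0]
    | false =>
      have hlen : b + ((false :: t).length : Int) = (b + 1) + (t.length : Int) := by
        push_cast [List.length_cons]; ring
      rw [truesFrom, hlen, ih (b + 1) prev (k + 1) parts (by push_cast; omega)]
      simp [aParts]

-- ===== VERDICT (by name: the statement is the Claim_ definition above) =====
theorem activity_scheme_py_spec : Claim_equal_activity_scheme_py := by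
  intro mask _
  unfold Spec_activity_scheme_py activity_scheme_py activity_scheme_py_alt
  have hB : (if (mask.length : Int) - ((bTrues mask).foldl bStep ([], -1)).2 - 1 ≠ 0 then
        ((bTrues mask).foldl bStep ([], -1)).1 ++
          [PySem.Int.toStr ((mask.length : Int) - ((bTrues mask).foldl bStep ([], -1)).2 - 1)]
      else ((bTrues mask).foldl bStep ([], -1)).1) = aParts 0 mask := by
    have := foldl_bStep_eq mask 0 (-1) 0 [] (by norm_num)
    rw [bTrues, enumerate_trues]
    simpa [finishB] using this
  by_cases h : mask = []
  · subst h
    simp [bTrues, PySem.List.enumerate, PySem.Str.join]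
  · simp only [if_neg h]
    have hA := foldl_aStep_eq mask [] 0
    rw [Nat.cast_zero] at hA
    show PySem.Str.join "" (flushP (mask.foldl aStep ([], (0 : Int))))
        = PySem.Str.join "" _
    rw [hA, hB]
    simp
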